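-- pv_equiv track=rewrite | github.com/cg-boundary/PolyOps | utils/algos.py | sections_from_list
-- ===== SOURCE A (Python) =====
-- def sections_from_list(items, split_points):
--     '''Returns a list of list or None
--     Splits the items into sub list based on split points
--     Each sub list will contain the split point on the start and end
--     '''
--     if not items or not split_points: return None
--
--     start = None
--     for index, item in enumerate(items):
--         if item in split_points:
--             start = index
--             break
--     end = None
--     for index, item in enumerate( reversed(items)):
--         if item in split_points:
--             end = len(items) - index
--             break
--
--     if start is None or end is None: return None
--
--     sections = []
--     sub_items = []
--
--     sub_items = items[end-1:]
--     for item in items: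
--         sub_items.append(item)
--         if item in split_points:
--             sections.append(sub_items)
--             sub_items = []
--             break
--
--     split_count = 0
--
--     for item in items[start:end]:
--         sub_items.append(item)
--         if item in split_points:
--             split_count += 1
--         if split_count == 2:
--             split_count = 1
--             sections.append(sub_items)
--             sub_items = []
--             sub_items.append(item)
--
--     return sections
-- ===== SOURCE B (Python) =====
-- def sections_from_list(items, split_points):
--     '''Index-table re-implementation: one enumerate pass to collect split
--     positions, then one wrap-around slice plus a pairwise pass.'''
--     positions = [i for i, x in enumerate(items) if x in split_points]
--     if not positions:
--         return None
--     sections = [items[positions[-1]:] + items[:positions[0] + 1]]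
--     for a, b in zip(positions, positions[1:]):
--         sections.append(items[a:b + 1])
--     return sections
-- ===== Notes on version B (the rewrite author's own statement) =====
-- stated objective: simpler
-- what changed: Replaces A's four loops (forward scan, reverse scan, break-loop, split_count-reset loop) with one positions table built by a single enumerate pass, a wrap-around slice, and a pairwise zip over consecutive positions.
import Mathlib
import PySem

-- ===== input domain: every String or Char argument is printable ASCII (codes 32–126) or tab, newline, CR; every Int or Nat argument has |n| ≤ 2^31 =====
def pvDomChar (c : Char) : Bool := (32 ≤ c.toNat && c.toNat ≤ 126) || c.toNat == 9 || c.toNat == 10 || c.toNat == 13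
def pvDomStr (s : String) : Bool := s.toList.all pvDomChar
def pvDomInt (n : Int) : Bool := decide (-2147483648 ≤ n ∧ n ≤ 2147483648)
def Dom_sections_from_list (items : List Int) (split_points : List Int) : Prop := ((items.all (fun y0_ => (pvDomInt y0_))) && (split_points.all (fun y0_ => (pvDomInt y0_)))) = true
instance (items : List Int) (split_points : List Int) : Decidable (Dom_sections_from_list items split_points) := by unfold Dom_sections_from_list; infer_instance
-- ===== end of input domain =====

-- B replaces A's four loops with one positions table, a wrap-around slice and a pairwise
-- pass over consecutive positions (objective: simpler; same return value, no side effects).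

-- ===== PORT A =====
-- 'for index, item in enumerate(xs): if item in split_points: <found index>; break'
def pvFindFirst (xs : List Int) (sp : List Int) (n : Nat) : Option Nat :=
  match xs with
  | [] => none
  | x :: xs => if x ∈ sp then some n else pvFindFirst xs sp (n + 1)

-- first loop over items: append to sub_items, emit and break at the first split point
def pvLoop1 (xs : List Int) (sp : List Int) (secs : List (List Int)) (sub : List Int) :
    List (List Int) × List Int :=
  match xs with
  | [] => (secs, sub)
  | x :: xs =>
    let sub := sub ++ [x]
    if x ∈ sp then (secs ++ [sub], []) else pvLoop1 xs sp secs sub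

-- second loop over items[start:end] with the split_count reset logic
def pvLoop2 (xs : List Int) (sp : List Int) (cnt : Nat) (secs : List (List Int)) (sub : List Int) :
    List (List Int) × List Int :=
  match xs with
  | [] => (secs, sub)
  | x :: xs =>
    let sub := sub ++ [x]
    let cnt := if x ∈ sp then cnt + 1 else cnt
    if cnt = 2 then pvLoop2 xs sp 1 (secs ++ [sub]) [x]
    else pvLoop2 xs sp cnt secs sub

def sections_from_list (items : List Int) (split_points : List Int) : Option (List (List Int)) :=
  if items = [] ∨ split_points = [] then none
  else
    let start? := pvFindFirst items split_points 0
    let end? := match pvFindFirst items.reverse split_points 0 with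
      | some j => some (items.length - j)
      | none => none
    match start?, end? with
    | some start, some e =>
      -- items[end-1:] (end ≥ 1 whenever found, so drop is exact for this slice)
      let sub0 := items.drop (e - 1)
      let r1 := pvLoop1 items split_points [] sub0
      -- items[start:end], both indices nonnegative: exact as drop/take
      let seg := (items.drop start).take (e - start)
      some (pvLoop2 seg split_points 0 r1.1 r1.2).1
    | _, _ => none

-- ===== PORT B =====
def sections_from_list_alt (items : List Int) (split_points : List Int) : Option (List (List Int)) :=
  let positions := ((items.zipIdx).filter (fun p => p.1 ∈ split_points)).map (fun p => p.2)
  match positions with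
  | [] => none
  | p0 :: rest =>
    let plast := (p0 :: rest).getLast (by simp)
    let wrap := items.drop plast ++ items.take (p0 + 1)
    some (wrap :: ((p0 :: rest).zip rest).map (fun q => (items.drop q.1).take (q.2 + 1 - q.1)))

-- ===== PRECONDITION & SPEC =====
def Spec_sections_from_list (items : List Int) (split_points : List Int) (out : Option (List (List Int))) : Prop := out = sections_from_list_alt items split_points
instance (items : List Int) (split_points : List Int) (out : Option (List (List Int))) : Decidable (Spec_sections_from_list items split_points out) := by unfold Spec_sections_from_list; infer_instance

-- ===== CLAIM (what is proved, stated in full; the proofs are below) =====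
def Claim_equal_sections_from_list : Prop := ∀ (items : List Int) (split_points : List Int), Dom_sections_from_list items split_points → Spec_sections_from_list items split_points (sections_from_list items split_points)

-- ===== LEMMAS AND PROOFS =====

-- the list of indices (offset n) of elements of xs that lie in sp
def pvPos (xs : List Int) (sp : List Int) (n : Nat) : List Nat :=
  match xs with
  | [] => []
  | x :: xs => if x ∈ sp then n :: pvPos xs sp (n + 1) else pvPos xs sp (n + 1)

theorem pvPos_append (xs ys sp : List Int) (n : Nat) :
    pvPos (xs ++ ys) sp n = pvPos xs sp n ++ pvPos ys sp (n + xs.length) := by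
  induction xs generalizing n with
  | nil => simp [pvPos]
  | cons x xs ih =>
    simp only [List.cons_append, pvPos, ih, List.length_cons]
    split_ifs <;> simp <;> ring_nf

theorem pvPos_lb {xs sp : List Int} {n q : Nat} (h : q ∈ pvPos xs sp n) : n ≤ q := by
  induction xs generalizing n with
  | nil => simp [pvPos] at h
  | cons x xs ih =>
    simp only [pvPos] at h
    split_ifs at h with hx
    · rcases List.mem_cons.1 h with h | h
      · omega
      · have := ih h; omega
    · have := ih h; omega

theorem pvPos_ub {xs sp : List Int} {n q : Nat} (h : q ∈ pvPos xs sp n) : q < n + xs.length := by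
  induction xs generalizing n with
  | nil => simp [pvPos] at h
  | cons x xs ih =>
    simp only [pvPos, List.length_cons] at h ⊢
    split_ifs at h with hx
    · rcases List.mem_cons.1 h with h | h
      · omega
      · have := ih h; omega
    · have := ih h; omega

theorem pvPos_shift (xs sp : List Int) (n : Nat) :
    pvPos xs sp (n + 1) = (pvPos xs sp n).map (· + 1) := by
  induction xs generalizing n with
  | nil => simp [pvPos]
  | cons x xs ih =>
    simp only [pvPos]
    split_ifs <;> simp [ih]

theorem pvFindFirst_eq_head? (xs sp : List Int) (n : Nat) :
    pvFindFirst xs sp n = (pvPos xs sp n).head? := by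
  induction xs generalizing n with
  | nil => rfl
  | cons x xs ih =>
    simp only [pvFindFirst, pvPos]
    split_ifs <;> simp [ih]

theorem pvPos_reverse (xs sp : List Int) :
    pvPos xs.reverse sp 0 = ((pvPos xs sp 0).map (fun p => xs.length - 1 - p)).reverse := by
  induction xs with
  | nil => rfl
  | cons x xs ih =>
    have hrev : (x :: xs).reverse = xs.reverse ++ [x] := by simp
    rw [hrev, pvPos_append, ih]
    have hmap : (pvPos xs sp 1).map (fun p => xs.length + 1 - 1 - p)
        = (pvPos xs sp 0).map (fun p => xs.length - 1 - p) := by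
      rw [pvPos_shift, List.map_map]
      apply List.map_congr_left
      intro p _
      simp only [Function.comp_apply]
      omega
    by_cases hx : x ∈ sp
    · simp only [pvPos, if_pos hx, List.length_reverse, Nat.zero_add, List.length_cons,
        List.map_cons, List.reverse_cons, hmap]
      simp
    · simp only [pvPos, if_neg hx, List.length_reverse, Nat.zero_add, List.length_cons, hmap]
      simp

-- decomposition at the first split position
theorem pvPos_first_split {xs sp : List Int} {n p : Nat} {qs : List Nat}
    (h : pvPos xs sp n = p :: qs) :
    n ≤ p ∧ ∃ b y u, xs = b ++ y :: u ∧ b.length = p - n ∧ pvPos b sp n = [] ∧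
      y ∈ sp ∧ pvPos u sp (p + 1) = qs := by
  induction xs generalizing n with
  | nil => simp [pvPos] at h
  | cons x xs ih =>
    simp only [pvPos] at h
    split_ifs at h with hx
    · injection h with h1 h2
      subst h1
      exact ⟨le_refl _, [], x, xs, by simp, by simp, rfl, hx, h2⟩
    · obtain ⟨hnp, b, y, u, hxs, hb, hpb, hy, hu⟩ := ih h
      refine ⟨by omega, x :: b, y, u, by simp [hxs], by simp; omega, ?_, hy, hu⟩
      simp [pvPos, hx, hpb]

theorem pvPos_nil_sp (xs : List Int) (n : Nat) : pvPos xs ([] : List Int) n = [] := by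
  induction xs generalizing n with
  | nil => rfl
  | cons x xs ih => simp [pvPos, ih]

theorem pvZipIdx_filter (xs sp : List Int) (n : Nat) :
    ((xs.zipIdx n).filter (fun p => p.1 ∈ sp)).map (fun p => p.2) = pvPos xs sp n := by
  induction xs generalizing n with
  | nil => rfl
  | cons x xs ih =>
    simp only [List.zipIdx_cons, List.filter_cons, pvPos]
    by_cases hx : x ∈ sp
    · simp [hx, ih]
    · simp [hx, ih]

theorem pvLoop1_char (xs sp : List Int) (secs : List (List Int)) (sub : List Int) :
    pvLoop1 xs sp secs sub =
      match pvPos xs sp 0 with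
      | [] => (secs, sub ++ xs)
      | k :: _ => (secs ++ [sub ++ xs.take (k + 1)], []) := by
  induction xs generalizing sub with
  | nil => simp [pvLoop1, pvPos]
  | cons x xs ih =>
    simp only [pvLoop1, pvPos]
    split_ifs with hx
    · simp
    · rw [ih (sub ++ [x]), pvPos_shift]
      cases hp : pvPos xs sp 0 with
      | nil => simp
      | cons k ks => simp

-- loop2 at count 1 passes a split-point-free block straight into sub
theorem pvLoop2_no_split {b : List Int} (sp : List Int) (hb : ∀ x ∈ b, x ∉ sp)
    (zs : List Int) (secs : List (List Int)) (sub : List Int) :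
    pvLoop2 (b ++ zs) sp 1 secs sub = pvLoop2 zs sp 1 secs (sub ++ b) := by
  induction b generalizing sub with
  | nil => simp
  | cons x xs ih =>
    have hx : x ∉ sp := hb x (by simp)
    simp only [List.cons_append, pvLoop2, if_neg hx]
    rw [if_neg (by omega : ¬ (1 : Nat) = 2)]
    rw [ih (fun y hy => hb y (by simp [hy])) (sub ++ [x])]
    simp

theorem pvPos_nil_no_split {b sp : List Int} {n : Nat} (h : pvPos b sp n = []) :
    ∀ x ∈ b, x ∉ sp := by
  induction b generalizing n with
  | nil => simp
  | cons x xs ih =>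
    intro y hy
    simp only [pvPos] at h
    by_cases hx : x ∈ sp
    · rw [if_pos hx] at h
      exact absurd h (List.cons_ne_nil _ _)
    · rw [if_neg hx] at h
      rcases List.mem_cons.1 hy with rfl | hy'
      · exact hx
      · exact ih h y hy'

theorem pvLoop2_step0 {x : Int} (xs sp : List Int) (secs : List (List Int)) (sub : List Int)
    (hx : x ∈ sp) :
    pvLoop2 (x :: xs) sp 0 secs sub = pvLoop2 xs sp 1 secs (sub ++ [x]) := by
  simp only [pvLoop2, if_pos hx]
  norm_num

theorem pvLoop2_step1 {x : Int} (xs sp : List Int) (secs : List (List Int)) (sub : List Int)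
    (hx : x ∈ sp) :
    pvLoop2 (x :: xs) sp 1 secs sub = pvLoop2 xs sp 1 (secs ++ [sub ++ [x]]) [x] := by
  simp only [pvLoop2, if_pos hx]
  norm_num

-- main interior lemma: loop2 over items[p0 : last+1] emits exactly the pairwise slices
theorem pvLoop2_main (items sp : List Int) :
    ∀ (ps : List Nat) (p0 : Nat) (secs : List (List Int)),
    pvPos (items.drop p0) sp p0 = p0 :: ps →
    (pvLoop2 ((items.drop p0).take ((p0 :: ps).getLast (by simp) + 1 - p0)) sp 0 secs []).1
      = secs ++ ((p0 :: ps).zip ps).map (fun q => (items.drop q.1).take (q.2 + 1 - q.1)) := by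
  intro ps
  induction ps with
  | nil =>
    intro p0 secs h
    obtain ⟨hle, b, y, u, hxs, hb, hpb, hy, hu⟩ := pvPos_first_split h
    have hb0 : b = [] := List.length_eq_zero_iff.1 (by omega)
    subst hb0
    simp only [List.nil_append] at hxs
    simp only [hxs, List.getLast_singleton]
    have h1 : p0 + 1 - p0 = 1 := by omega
    rw [h1]
    simp [pvLoop2, hy]
  | cons p1 ps ih =>
    intro p0 secs h
    obtain ⟨hle, b, y, u, hxs, hb, hpb, hy, hu⟩ := pvPos_first_split h
    have hb0 : b = [] := List.length_eq_zero_iff.1 (by omega)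
    subst hb0
    simp only [List.nil_append] at hxs
    obtain ⟨hle1, b1, y1, u1, hu1, hb1, hpb1, hy1, hu1pos⟩ := pvPos_first_split hu
    obtain ⟨L, hL⟩ : ∃ L, (p1 :: ps).getLast (by simp) = L := ⟨_, rfl⟩
    have hLmem : L ∈ p1 :: ps := hL ▸ List.getLast_mem _
    have hLlb : p1 ≤ L := by
      rcases List.mem_cons.1 hLmem with rfl | hm
      · omega
      · have : L ∈ pvPos u1 sp (p1 + 1) := hu1pos ▸ hm
        have := pvPos_lb this; omega
    have hgl : (p0 :: p1 :: ps).getLast (by simp) = L := by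
      rw [List.getLast_cons (by simp)]
      exact hL
    have hdrop1 : items.drop p1 = y1 :: u1 := by
      have h1 : items.drop p1 = (items.drop p0).drop (p1 - p0) := by
        rw [List.drop_drop]; congr 1; omega
      rw [h1, hxs]
      have h2 : (y :: u).drop (p1 - p0) = u.drop (p1 - p0 - 1) := by
        have : p1 - p0 = (p1 - p0 - 1) + 1 := by omega
        rw [this]; simp
      rw [h2, hu1]
      have : p1 - p0 - 1 = b1.length := by omega
      rw [this, List.drop_left]
    have hu1t : (items.drop p1).tail = u1 := by rw [hdrop1]; rfl
    have hseg : (items.drop p0).take (L + 1 - p0)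
        = y :: (b1 ++ y1 :: u1.take (L - p1)) := by
      rw [hxs]
      have h1 : L + 1 - p0 = ((b1 ++ [y1]).length) + (L - p1) + 1 := by
        simp; omega
      rw [h1]
      simp only [List.take_succ_cons]
      congr 1
      rw [hu1]
      have h2 : b1 ++ y1 :: u1 = (b1 ++ [y1]) ++ u1 := by simp
      have h3 : b1 ++ y1 :: u1.take (L - p1) = (b1 ++ [y1]) ++ u1.take (L - p1) := by simp
      rw [h2, h3, List.take_append]
      congr 1
      · exact List.take_of_length_le (by simp)
      · congr 1
        simp
    rw [hgl, hseg]
    -- one step of loop2: y ∈ sp, count 0 → 1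
    rw [pvLoop2_step0 _ sp secs [] hy, List.nil_append]
    -- block b1 has no split points
    rw [pvLoop2_no_split sp (pvPos_nil_no_split hpb1)]
    -- hit y1: count 2, emit
    rw [pvLoop2_step1 _ sp secs ([y] ++ b1) hy1]
    -- the emitted section is items[p0:p1+1]
    have hsec : ([y] ++ b1) ++ [y1] = (items.drop p0).take (p1 + 1 - p0) := by
      rw [hxs]
      have h1 : p1 + 1 - p0 = (b1 ++ [y1]).length + 1 := by simp; omega
      rw [h1]
      simp only [List.take_succ_cons]
      rw [hu1]
      have h2 : b1 ++ y1 :: u1 = (b1 ++ [y1]) ++ u1 := by simp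
      rw [h2, List.take_left]
      simp
    have hpos1 : pvPos (items.drop p1) sp p1 = p1 :: ps := by
      rw [hdrop1]
      simp [pvPos, hy1, hu1pos]
    have hIH := ih p1 (secs ++ [([y] ++ b1) ++ [y1]]) hpos1
    have hseg1 : (items.drop p1).take ((p1 :: ps).getLast (by simp) + 1 - p1)
        = y1 :: u1.take (L - p1) := by
      rw [hL, hdrop1]
      have h1 : L + 1 - p1 = (L - p1) + 1 := by omega
      rw [h1]
      simp [List.take_succ_cons]
    rw [hseg1] at hIH
    rw [pvLoop2_step0 _ sp _ [] hy1, List.nil_append] at hIH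
    have e1 : ([y] ++ b1) ++ [y1] = [y] ++ b1 ++ [y1] := by simp
    rw [e1, hIH, hsec]
    simp

-- ===== VERDICT (by name: the statement is the Claim_ definition above) =====
theorem sections_from_list_spec : Claim_equal_sections_from_list := by
  intro items sp _
  unfold Spec_sections_from_list sections_from_list sections_from_list_alt
  rw [pvZipIdx_filter]
  by_cases htriv : items = [] ∨ sp = []
  · rw [if_pos htriv]
    rcases htriv with rfl | rfl
    · rfl
    · rw [pvPos_nil_sp]
  · rw [if_neg htriv]
    cases hp : pvPos items sp 0 with
    | nil =>
      rw [pvFindFirst_eq_head?, hp]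
      rfl
    | cons p0 ps =>
      have hstart : pvFindFirst items sp 0 = some p0 := by
        rw [pvFindFirst_eq_head?, hp]; rfl
      have hp0mem : p0 ∈ pvPos items sp 0 := by rw [hp]; simp
      have hp0ub : p0 < items.length := by have := pvPos_ub hp0mem; omega
      set L := (p0 :: ps).getLast (by simp) with hLdef
      have hLmem : L ∈ pvPos items sp 0 := by rw [hp]; exact List.getLast_mem _
      have hLub : L < items.length := by have := pvPos_ub hLmem; omega
      have hend : pvFindFirst items.reverse sp 0 = some (items.length - 1 - L) := by
        rw [pvFindFirst_eq_head?, pvPos_reverse, List.head?_reverse, List.getLast?_map, hp,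
          List.getLast?_eq_some_getLast (by simp : p0 :: ps ≠ [])]
        rfl
      rw [hstart, hend]
      simp only []
      have he : items.length - (items.length - 1 - L) = L + 1 := by omega
      rw [he]
      have hL1 : L + 1 - 1 = L := by omega
      rw [hL1]
      rw [pvLoop1_char]
      rw [hp]
      simp only []
      -- positions of the suffix starting at the first split point
      have hpos : pvPos (items.drop p0) sp p0 = p0 :: ps := by
        have hsplit := pvPos_append (items.take p0) (items.drop p0) sp 0
        rw [List.take_append_drop] at hsplit
        have hlen : (items.take p0).length = p0 := by simp; omega
        rw [hlen, hp] at hsplit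
        cases hq : pvPos (items.take p0) sp 0 with
        | nil =>
          rw [hq] at hsplit
          simpa using hsplit.symm
        | cons q qs =>
          exfalso
          have hub := pvPos_ub (show q ∈ pvPos (items.take p0) sp 0 by rw [hq]; simp)
          rw [hq] at hsplit
          have : p0 = q := by
            have := hsplit
            simp at this
            exact this.1
          rw [hlen] at hub
          omega
      have hmain := pvLoop2_main items sp ps p0 [items.drop L ++ items.take (p0 + 1)] hpos
      rw [hLdef] at hmain ⊢
      rw [List.nil_append, hmain]
      rfl
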